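-- pv_equiv track=rewrite | github.com/RUP25/noize | backend/app/charts.py | _interleave_chart_ids
-- ===== SOURCE A (Python) =====
-- from typing import Any, Dict, List, Set
--
-- def _interleave_chart_ids(new_ids: List[int], hot_ids: List[int], limit: int, new_bias: int) -> List[int]:
--     """
--     Merge new-release ids with trending. new_bias: 1 = balanced 1:1, 2 = new_music_heavy (2 new : 1 hot).
--     """
--     seen: Set[int] = set()
--     out: List[int] = []
--     i, j = 0, 0
--     take_new_streak = 0
--     while len(out) < limit and (i < len(new_ids) or j < len(hot_ids)):
--         want_new = take_new_streak < new_bias and i < len(new_ids)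
--         if want_new:
--             sid = new_ids[i]
--             i += 1
--             take_new_streak += 1
--         elif j < len(hot_ids):
--             sid = hot_ids[j]
--             j += 1
--             take_new_streak = 0
--         elif i < len(new_ids):
--             sid = new_ids[i]
--             i += 1
--             take_new_streak += 1
--         else:
--             break
--         if sid in seen:
--             continue
--         seen.add(sid)
--         out.append(sid)
--     return out
-- ===== SOURCE B (Python) =====
-- from typing import List
--
--
-- def _interleave_chart_ids(new_ids: List[int], hot_ids: List[int], limit: int, new_bias: int) -> List[int]:
--     # Phase 1: merge the two streams to full exhaustion (no dedup, no limit).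
--     merged: List[int] = []
--     i = j = 0
--     streak = 0
--     while i < len(new_ids) or j < len(hot_ids):
--         if streak < new_bias and i < len(new_ids):
--             merged.append(new_ids[i])
--             i += 1
--             streak += 1
--         elif j < len(hot_ids):
--             merged.append(hot_ids[j])
--             j += 1
--             streak = 0
--         else:
--             merged.append(new_ids[i])
--             i += 1
--             streak += 1
--     # Phase 2: keep first occurrences.
--     seen = set()
--     out: List[int] = []
--     for sid in merged:
--         if sid not in seen:
--             seen.add(sid)
--             out.append(sid)
--     # Phase 3: truncate.
--     return out[:max(limit, 0)]
-- ===== Notes on version B (the rewrite author's own statement) =====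
-- stated objective: alternative
-- what changed: Replaces A's single fused loop (limit check + interleave + dedup all in one iteration) by three separate phases: a pure interleave of both streams to exhaustion, then one dedup pass keeping first occurrences, then a truncating slice out[:max(limit,0)].
import Mathlib
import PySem

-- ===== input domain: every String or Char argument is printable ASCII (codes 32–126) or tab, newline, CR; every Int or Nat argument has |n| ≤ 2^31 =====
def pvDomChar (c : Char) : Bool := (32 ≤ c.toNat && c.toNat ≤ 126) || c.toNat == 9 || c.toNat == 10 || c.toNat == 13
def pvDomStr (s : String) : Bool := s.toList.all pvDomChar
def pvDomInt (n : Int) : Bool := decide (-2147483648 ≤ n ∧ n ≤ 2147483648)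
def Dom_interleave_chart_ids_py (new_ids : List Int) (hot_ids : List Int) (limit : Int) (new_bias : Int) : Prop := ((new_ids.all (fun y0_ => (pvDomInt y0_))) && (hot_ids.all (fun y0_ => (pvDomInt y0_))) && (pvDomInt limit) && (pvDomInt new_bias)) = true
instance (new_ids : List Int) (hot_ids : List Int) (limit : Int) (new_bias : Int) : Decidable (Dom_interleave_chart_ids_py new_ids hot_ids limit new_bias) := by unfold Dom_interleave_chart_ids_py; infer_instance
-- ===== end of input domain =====

-- B replaces A's single fused loop by three phases: interleave both streams to
-- exhaustion, one dedup pass keeping first occurrences, then a truncating slice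
-- out[:max(limit,0)] (objective: alternative decomposition, same cost).

-- ===== PORT A =====
-- A's while loop: fused state (seen, out, i, j, take_new_streak), limit checked each turn.
def interleaveLoopA (new hot : List Int) (limit nb : Int) (seen : PySem.Set Int)
    (out : List Int) (i j : Nat) (streak : Int) : List Int :=
  if _hw : (out.length : Int) < limit ∧ (i < new.length ∨ j < hot.length) then
    if h1 : streak < nb ∧ i < new.length then
      let sid := new.getD i 0
      if PySem.Set.contains seen sid then
        interleaveLoopA new hot limit nb seen out (i + 1) j (streak + 1)
      else
        interleaveLoopA new hot limit nb (PySem.Set.add seen sid) (out ++ [sid]) (i + 1) j (streak + 1)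
    else if h2 : j < hot.length then
      let sid := hot.getD j 0
      if PySem.Set.contains seen sid then
        interleaveLoopA new hot limit nb seen out i (j + 1) 0
      else
        interleaveLoopA new hot limit nb (PySem.Set.add seen sid) (out ++ [sid]) i (j + 1) 0
    else if h3 : i < new.length then
      let sid := new.getD i 0
      if PySem.Set.contains seen sid then
        interleaveLoopA new hot limit nb seen out (i + 1) j (streak + 1)
      else
        interleaveLoopA new hot limit nb (PySem.Set.add seen sid) (out ++ [sid]) (i + 1) j (streak + 1)
    else out
  else out
termination_by (new.length - i) + (hot.length - j)
decreasing_by all_goals omega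

def interleave_chart_ids_py (new_ids : List Int) (hot_ids : List Int) (limit : Int) (new_bias : Int) : List Int :=
  interleaveLoopA new_ids hot_ids limit new_bias PySem.Set.empty [] 0 0 0

-- ===== PORT B =====
-- B phase 1: the interleave stream of both lists, run to exhaustion (no dedup, no limit).
def mergeB (new hot : List Int) (nb : Int) (i j : Nat) (streak : Int) : List Int :=
  if hw : i < new.length ∨ j < hot.length then
    if h1 : streak < nb ∧ i < new.length then
      new.getD i 0 :: mergeB new hot nb (i + 1) j (streak + 1)
    else if h2 : j < hot.length then
      hot.getD j 0 :: mergeB new hot nb i (j + 1) 0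
    else
      new.getD i 0 :: mergeB new hot nb (i + 1) j (streak + 1)
  else []
termination_by (new.length - i) + (hot.length - j)
decreasing_by all_goals omega

def interleave_chart_ids_py_alt (new_ids : List Int) (hot_ids : List Int) (limit : Int) (new_bias : Int) : List Int :=
  let merged := mergeB new_ids hot_ids new_bias 0 0 0
  -- B phase 2: dedup pass (for sid in merged: if sid not in seen: …)
  let p := merged.foldl
    (fun (acc : PySem.Set Int × List Int) sid =>
      if PySem.Set.contains acc.1 sid then acc else (PySem.Set.add acc.1 sid, acc.2 ++ [sid]))
    (PySem.Set.empty, [])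
  -- B phase 3: out[:max(limit, 0)]
  PySem.List.slice p.2 none (some (max limit 0))

-- ===== PRECONDITION & SPEC =====
def Spec_interleave_chart_ids_py (new_ids : List Int) (hot_ids : List Int) (limit : Int) (new_bias : Int) (out : List Int) : Prop := out = interleave_chart_ids_py_alt new_ids hot_ids limit new_bias
instance (new_ids : List Int) (hot_ids : List Int) (limit : Int) (new_bias : Int) (out : List Int) : Decidable (Spec_interleave_chart_ids_py new_ids hot_ids limit new_bias out) := by unfold Spec_interleave_chart_ids_py; infer_instance

-- ===== CLAIM (what is proved, stated in full; the proofs are below) =====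
def Claim_equal_interleave_chart_ids_py : Prop := ∀ (new_ids : List Int) (hot_ids : List Int) (limit : Int) (new_bias : Int), Dom_interleave_chart_ids_py new_ids hot_ids limit new_bias → Spec_interleave_chart_ids_py new_ids hot_ids limit new_bias (interleave_chart_ids_py new_ids hot_ids limit new_bias)

-- ===== LEMMAS AND PROOFS =====

-- dedup of a list, threading the seen-set (proof-side characterisation of B's fold).
def dd (seen : PySem.Set Int) : List Int → List Int
  | [] => []
  | x :: xs => if PySem.Set.contains seen x then dd seen xs else x :: dd (PySem.Set.add seen x) xs

theorem foldl_dd (l : List Int) : ∀ (seen : PySem.Set Int) (out : List Int),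
    (l.foldl
      (fun (acc : PySem.Set Int × List Int) sid =>
        if PySem.Set.contains acc.1 sid then acc else (PySem.Set.add acc.1 sid, acc.2 ++ [sid]))
      (seen, out)).2 = out ++ dd seen l := by
  induction l with
  | nil => intro seen out; simp [dd]
  | cons x xs ih =>
    intro seen out
    rw [List.foldl_cons]
    by_cases hs : PySem.Set.contains seen x = true
    · rw [if_pos hs, ih]
      simp only [dd]
      rw [if_pos hs]
    · rw [if_neg hs, ih]
      simp only [dd]
      rw [if_neg hs]
      simp [List.append_assoc]

theorem loopA_eq_dd_merge (new hot : List Int) (limit nb : Int) :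
    ∀ (n i j : Nat), new.length - i + (hot.length - j) ≤ n →
    ∀ (streak : Int) (seen : PySem.Set Int) (out : List Int),
    interleaveLoopA new hot limit nb seen out i j streak =
      out ++ (dd seen (mergeB new hot nb i j streak)).take (limit - out.length).toNat := by
  intro n
  induction n with
  | zero =>
    intro i j hn streak seen out
    have hi : ¬ (i < new.length ∨ j < hot.length) := by omega
    rw [interleaveLoopA, mergeB]
    simp [hi, dd]
  | succ n ih =>
    intro i j hn streak seen out
    by_cases hc : i < new.length ∨ j < hot.length
    · by_cases hl : (out.length : Int) < limit
      · -- one step of both programs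
        have hk : (limit - (out.length : Int)).toNat = (limit - ((out.length : Int) + 1)).toNat + 1 := by
          omega
        rw [interleaveLoopA, mergeB]
        by_cases h1 : streak < nb ∧ i < new.length
        · have hm : new.length - (i + 1) + (hot.length - j) ≤ n := by omega
          rw [dif_pos ⟨hl, hc⟩, dif_pos hc, dif_pos h1, dif_pos h1]
          by_cases hs : PySem.Set.contains seen (new.getD i 0) = true
          · rw [if_pos hs, ih _ _ hm]
            simp only [dd]
            rw [if_pos hs]
          · rw [if_neg hs, ih _ _ hm]
            simp only [dd]
            rw [if_neg hs, hk, List.take_succ_cons]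
            simp [List.append_assoc]
        · by_cases h2 : j < hot.length
          · have hm : new.length - i + (hot.length - (j + 1)) ≤ n := by omega
            rw [dif_pos ⟨hl, hc⟩, dif_pos hc, dif_neg h1, dif_neg h1, dif_pos h2, dif_pos h2]
            by_cases hs : PySem.Set.contains seen (hot.getD j 0) = true
            · rw [if_pos hs, ih _ _ hm]
              simp only [dd]
              rw [if_pos hs]
            · rw [if_neg hs, ih _ _ hm]
              simp only [dd]
              rw [if_neg hs, hk, List.take_succ_cons]
              simp [List.append_assoc]
          · have h3 : i < new.length := by omega
            have hm : new.length - (i + 1) + (hot.length - j) ≤ n := by omega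
            rw [dif_pos ⟨hl, hc⟩, dif_pos hc, dif_neg h1, dif_neg h1, dif_neg h2, dif_neg h2,
              dif_pos h3]
            by_cases hs : PySem.Set.contains seen (new.getD i 0) = true
            · rw [if_pos hs, ih _ _ hm]
              simp only [dd]
              rw [if_pos hs]
            · rw [if_neg hs, ih _ _ hm]
              simp only [dd]
              rw [if_neg hs, hk, List.take_succ_cons]
              simp [List.append_assoc]
      · -- limit reached: loop returns out, take amount is 0
        have hz : (limit - (out.length : Int)).toNat = 0 := by omega
        rw [interleaveLoopA]
        simp [hl, hz]
    · rw [interleaveLoopA, mergeB]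
      simp [hc, dd]

-- ===== VERDICT (by name: the statement is the Claim_ definition above) =====
theorem interleave_chart_ids_py_spec : Claim_equal_interleave_chart_ids_py := by
  intro new_ids hot_ids limit new_bias _
  unfold Spec_interleave_chart_ids_py interleave_chart_ids_py interleave_chart_ids_py_alt
  dsimp only
  rw [loopA_eq_dd_merge new_ids hot_ids limit new_bias
      (new_ids.length - 0 + (hot_ids.length - 0)) 0 0 (le_refl _), foldl_dd]
  have hmax : max limit 0 = (((max limit 0).toNat : Nat) : Int) := by omega
  rw [hmax, PySem.List.slice_to_natCast]
  have h1 : limit.toNat = (max limit 0).toNat := by omega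
  simp [h1]
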